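-- pv_equiv track=rewrite | github.com/krapka26/task1 | task1.py | split_numbers
-- ===== SOURCE A (Python) =====
-- def split_numbers(str):
--     digit,nodigit,f, num = [],"", False, 0
--     for i in str:
--         if not i.isdigit():
--             if f:
--                 f = False
--                 digit.append(num)
--                 num = 0
--             nodigit += i
--         else:
--             f = True
--             num*=10
--             num+=int(i)
--     if f:
--         digit.append(num)
--     return digit, nodigit
-- ===== SOURCE B (Python) =====
-- def split_numbers(str):
--     digit, nodigit = [], ""
--     i, n = 0, len(str)
--     while i < n:
--         if str[i].isdigit():
--             num = 0
--             while i < n and str[i].isdigit():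
--                 num = 10 * num + int(str[i])
--                 i += 1
--             digit.append(num)
--         else:
--             j = i
--             while j < n and not str[j].isdigit():
--                 j += 1
--             nodigit += str[i:j]
--             i = j
--     return digit, nodigit
-- ===== Notes on version B (the rewrite author's own statement) =====
-- stated objective: alternative
-- what changed: Replaces the single character-by-character pass with a pending-number flag and flush logic by an outer loop over maximal runs: an inner loop consumes a whole digit run into one number, and whole non-digit runs are appended by slicing, so no flag or end-of-string flush is needed.
import Mathlib
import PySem

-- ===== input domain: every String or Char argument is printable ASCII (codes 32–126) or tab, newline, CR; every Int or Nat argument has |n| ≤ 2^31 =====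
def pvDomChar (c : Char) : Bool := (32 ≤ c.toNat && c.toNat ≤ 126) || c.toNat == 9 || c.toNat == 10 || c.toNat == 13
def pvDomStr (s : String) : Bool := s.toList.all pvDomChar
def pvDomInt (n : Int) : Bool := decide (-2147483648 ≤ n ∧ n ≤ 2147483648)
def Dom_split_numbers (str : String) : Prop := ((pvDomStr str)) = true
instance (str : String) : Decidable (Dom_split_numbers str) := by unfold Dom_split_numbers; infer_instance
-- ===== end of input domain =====

-- B replaces A's flag-and-flush single pass by an outer loop over maximal digit / non-digit runs (alternative decomposition, same cost).

-- ===== PORT A =====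
-- int(i) for a single character i (exact: PySem.Int.ofChars? = Python int(); returns in A since i.isdigit() holds there)
def pvIntChar (c : Char) : Int := (PySem.Int.ofChars? [c]).getD 0

-- one iteration of A's for-loop; state = ((digit, nodigit), f, num)
def pvStepA (st : (List Int × String) × Bool × Int) (c : Char) : (List Int × String) × Bool × Int :=
  let ((digit, nodigit), f, num) := st
  if !(PySem.Chars.isdigit c) then
    if f then ((digit ++ [num], nodigit.push c), false, 0)
    else ((digit, nodigit.push c), f, num)
  else ((digit, nodigit), true, num * 10 + pvIntChar c)

def split_numbers (str : String) : List Int × String :=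
  let ((digit, nodigit), f, num) := str.toList.foldl pvStepA (([], ""), false, 0)
  if f then (digit ++ [num], nodigit) else (digit, nodigit)

-- ===== PORT B =====
-- inner while loop: consume the leading digit run into num (B's `num = 10 * num + int(str[i])`)
def pvDigitsB : List Char → Int → Int × List Char
  | [], num => (num, [])
  | c :: rest, num =>
    if PySem.Chars.isdigit c then pvDigitsB rest (10 * num + pvIntChar c) else (num, c :: rest)

theorem pvDigitsB_len : ∀ (cs : List Char) (num : Int), (pvDigitsB cs num).2.length ≤ cs.length := by
  intro cs
  induction cs with
  | nil => intro num; simp [pvDigitsB]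
  | cons c rest ih =>
    intro num
    simp only [pvDigitsB]
    split
    · exact le_trans (ih _) (Nat.le_succ _)
    · simp

-- outer while loop over runs, transcribed as recursion on the remaining characters
def pvMainB : List Char → List Int × List Char
  | [] => ([], [])
  | c :: rest =>
    if h : PySem.Chars.isdigit c then
      let pr := pvDigitsB (c :: rest) 0
      let r := pvMainB pr.2
      (pr.1 :: r.1, r.2)
    else
      let r := pvMainB ((c :: rest).dropWhile (fun x => !PySem.Chars.isdigit x))
      (r.1, (c :: rest).takeWhile (fun x => !PySem.Chars.isdigit x) ++ r.2)
  termination_by cs => cs.length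
  decreasing_by
  · simp only [pvDigitsB, h, if_true, List.length_cons]
    exact Nat.lt_succ_of_le (pvDigitsB_len rest _)
  · simp only [List.dropWhile, h, Bool.not_false, List.length_cons]
    exact Nat.lt_succ_of_le (List.length_dropWhile_le _ _)

def split_numbers_alt (str : String) : List Int × String :=
  let r := pvMainB str.toList
  (r.1, String.ofList r.2)

-- ===== PRECONDITION & SPEC =====
def Spec_split_numbers (str : String) (out : List Int × String) : Prop := out = split_numbers_alt str
instance (str : String) (out : List Int × String) : Decidable (Spec_split_numbers str out) := by unfold Spec_split_numbers; infer_instance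

-- ===== CLAIM (what is proved, stated in full; the proofs are below) =====
def Claim_equal_split_numbers : Prop := ∀ (str : String), Dom_split_numbers str → Spec_split_numbers str (split_numbers str)

-- ===== LEMMAS AND PROOFS =====

-- A's machine, rephrased as recursion on the character list with list-of-char nodigit
def pvRunA (cs : List Char) (ds : List Int) (nd : List Char) (f : Bool) (num : Int) : List Int × List Char :=
  match cs with
  | [] => if f then (ds ++ [num], nd) else (ds, nd)
  | c :: rest =>
    if !(PySem.Chars.isdigit c) then
      if f then pvRunA rest (ds ++ [num]) (nd ++ [c]) false 0
      else pvRunA rest ds (nd ++ [c]) f num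
    else pvRunA rest ds nd true (num * 10 + pvIntChar c)

theorem pvFoldA_eq_runA : ∀ (cs : List Char) (ds : List Int) (nd : String) (f : Bool) (num : Int),
    (let ((d, n), f', num') := cs.foldl pvStepA ((ds, nd), f, num)
     if f' then (d ++ [num'], n) else (d, n))
    = (fun p : List Int × List Char => (p.1, String.ofList p.2)) (pvRunA cs ds nd.toList f num) := by
  intro cs
  induction cs with
  | nil =>
    intro ds nd f num
    simp only [List.foldl_nil, pvRunA]
    split <;> simp [String.ofList_toList]
  | cons c rest ih =>
    intro ds nd f num
    simp only [List.foldl_cons, pvStepA, pvRunA]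
    by_cases hd : PySem.Chars.isdigit c
    · simpa [hd] using ih ds nd true (num * 10 + pvIntChar c)
    · by_cases hf : f
      · simpa [hd, hf, String.toList_push] using ih (ds ++ [num]) (nd.push c) false 0
      · simpa [hd, hf, String.toList_push] using ih ds (nd.push c) f num

-- a digit run: A with the flag set behaves like B's inner loop followed by a flush
theorem pvRunA_true : ∀ (cs : List Char) (ds : List Int) (nd : List Char) (num : Int),
    pvRunA cs ds nd true num
      = pvRunA (pvDigitsB cs num).2 (ds ++ [(pvDigitsB cs num).1]) nd false 0 := by
  intro cs
  induction cs with
  | nil => intro ds nd num; simp [pvRunA, pvDigitsB]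
  | cons c rest ih =>
    intro ds nd num
    by_cases hd : PySem.Chars.isdigit c
    · have hc : num * 10 + pvIntChar c = 10 * num + pvIntChar c := by ring
      simp only [pvRunA, pvDigitsB, hd, Bool.not_true, if_true, Bool.false_eq_true, if_false, hc]
      exact ih ds nd (10 * num + pvIntChar c)
    · simp [pvRunA, pvDigitsB, hd]

-- B on a leading non-digit character, without the run-taking detour
theorem pvMainB_nondigit (c : Char) (rest : List Char) (h : ¬ PySem.Chars.isdigit c) :
    pvMainB (c :: rest) = ((pvMainB rest).1, c :: (pvMainB rest).2) := by
  cases rest with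
  | nil => simp [pvMainB, h]
  | cons x r =>
    by_cases hx : PySem.Chars.isdigit x
    · simp [pvMainB, h, hx, List.takeWhile, List.dropWhile]
    · simp only [pvMainB, h, dif_neg, List.takeWhile, List.dropWhile, hx, Bool.not_false,
        Bool.false_eq_true, not_false_eq_true]
      simp

theorem pvRunA_eq_mainB : ∀ (n : Nat) (cs : List Char), cs.length ≤ n →
    ∀ (ds : List Int) (nd : List Char),
    pvRunA cs ds nd false 0 = (ds ++ (pvMainB cs).1, nd ++ (pvMainB cs).2) := by
  intro n
  induction n with
  | zero =>
    intro cs hlen ds nd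
    have : cs = [] := List.eq_nil_of_length_eq_zero (Nat.le_zero.mp hlen)
    subst this; simp [pvRunA, pvMainB]
  | succ n ih =>
    intro cs hlen ds nd
    cases cs with
    | nil => simp [pvRunA, pvMainB]
    | cons c rest =>
      by_cases hd : PySem.Chars.isdigit c
      · have hstep : pvRunA (c :: rest) ds nd false 0
            = pvRunA rest ds nd true (10 * 0 + pvIntChar c) := by
          simp [pvRunA, hd]
        have hdig : pvDigitsB (c :: rest) 0 = pvDigitsB rest (10 * 0 + pvIntChar c) := by
          simp [pvDigitsB, hd]
        have hlen' : (pvDigitsB rest (10 * 0 + pvIntChar c)).2.length ≤ n := by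
          have := pvDigitsB_len rest (10 * 0 + pvIntChar c)
          have hr : rest.length ≤ n := Nat.lt_succ_iff.mp (Nat.lt_of_lt_of_le (Nat.lt_succ_self _) hlen)
          omega
        rw [hstep, pvRunA_true, ih _ hlen']
        simp only [pvMainB, hd, dif_pos, hdig]
        simp
      · have hstep : pvRunA (c :: rest) ds nd false 0 = pvRunA rest ds (nd ++ [c]) false 0 := by
          simp [pvRunA, hd]
        have hr : rest.length ≤ n := Nat.succ_le_succ_iff.mp hlen
        rw [hstep, ih _ hr, pvMainB_nondigit c rest hd]
        simp

-- ===== VERDICT (by name: the statement is the Claim_ definition above) =====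
theorem split_numbers_spec : Claim_equal_split_numbers := by
  intro s _
  unfold Spec_split_numbers split_numbers split_numbers_alt
  have h := pvFoldA_eq_runA s.toList [] "" false 0
  have h2 := pvRunA_eq_mainB s.toList.length s.toList (le_refl _) [] (("" : String).toList)
  rw [h2] at h
  simpa using h
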